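-- pv_equiv track=rewrite | github.com/alexandraback/datacollection | solutions_1595491_1/Python/yzernik/b.py | max_googlers
-- ===== SOURCE A (Python) =====
-- def max_googlers(n, s, p, t):
--     result = 0
--     s_remaining = s
--     i = 0
--     for t_j in t:
--         i += 1
--         if t_j >= p*3:
--             result += 1
--         elif t_j >= p*3 - 2 and (p-1) >= 0:
--             result += 1
--         elif s_remaining > 0:
--             if t_j >= p*3 - 4 and (p-2) >= 0:
--                 result += 1
--                 s_remaining -= 1
--     return result
-- ===== SOURCE B (Python) =====
-- def max_googlers(n, s, p, t):
--     # Cost model: each triplet needs 0 surprises (sure), 1 surprise, or is hopeless.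
--     # Sort the achievable costs ascending and greedily take a prefix within the budget.
--     def cost(x):
--         if x >= 3*p:
--             return 0
--         if p >= 1 and x >= 3*p - 2:
--             return 0
--         if p >= 2 and x >= 3*p - 4:
--             return 1
--         return None
--     costs = sorted(c for c in map(cost, t) if c is not None)
--     cap = max(s, 0)
--     spent = 0
--     total = 0
--     for c in costs:
--         if spent + c > cap:
--             break
--         total += 1
--         spent += c
--     return total
-- ===== Notes on version B (the rewrite author's own statement) =====
-- stated objective: alternative
-- what changed: Recasts the task as a min-cost selection: maps each score to a surprise cost (0, 1, or unattainable), sorts the costs, and takes the longest affordable prefix under the budget, instead of A's single stateful classification loop that decrements s_remaining.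
import Mathlib
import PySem

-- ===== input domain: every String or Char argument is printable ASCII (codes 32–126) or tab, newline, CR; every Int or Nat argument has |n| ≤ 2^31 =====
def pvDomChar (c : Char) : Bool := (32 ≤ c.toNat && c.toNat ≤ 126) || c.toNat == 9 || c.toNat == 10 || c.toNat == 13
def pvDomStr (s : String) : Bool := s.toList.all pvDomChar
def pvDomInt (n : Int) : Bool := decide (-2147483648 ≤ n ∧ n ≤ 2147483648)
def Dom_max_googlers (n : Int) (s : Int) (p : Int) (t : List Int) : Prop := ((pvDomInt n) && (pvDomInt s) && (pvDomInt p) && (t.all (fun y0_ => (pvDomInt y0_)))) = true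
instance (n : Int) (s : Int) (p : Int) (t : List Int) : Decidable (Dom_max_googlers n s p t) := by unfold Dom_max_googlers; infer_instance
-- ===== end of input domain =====

-- ===== PORT A =====
-- B recasts the task as min-cost selection (cost per score, sort, affordable prefix) instead of A's
-- stateful classification loop; objective: alternative (same result, different algorithm).
def maxLoop (p : Int) : List Int → Int → Int → Int → Int
  | [], result, _, _ => result
  | tj :: rest, result, s_remaining, i =>
    if tj ≥ p*3 then maxLoop p rest (result+1) s_remaining (i+1)
    else if tj ≥ p*3 - 2 ∧ p - 1 ≥ 0 then maxLoop p rest (result+1) s_remaining (i+1)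
    else if s_remaining > 0 then
      (if tj ≥ p*3 - 4 ∧ p - 2 ≥ 0 then maxLoop p rest (result+1) (s_remaining-1) (i+1)
       else maxLoop p rest result s_remaining (i+1))
    else maxLoop p rest result s_remaining (i+1)

def max_googlers (n : Int) (s : Int) (p : Int) (t : List Int) : Int :=
  maxLoop p t 0 s 0

-- ===== PORT B =====
def bCost (p x : Int) : Option Int :=
  if x ≥ 3*p then some 0
  else if p ≥ 1 ∧ x ≥ 3*p - 2 then some 0
  else if p ≥ 2 ∧ x ≥ 3*p - 4 then some 1
  else none

-- the for-loop with break over the sorted cost list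
def bLoop (cap : Int) : List Int → Int → Int → Int
  | [], total, _ => total
  | c :: rest, total, spent =>
    if spent + c > cap then total
    else bLoop cap rest (total+1) (spent+c)

def max_googlers_alt (n : Int) (s : Int) (p : Int) (t : List Int) : Int :=
  bLoop (max s 0) (PySem.List.sorted (t.filterMap (bCost p)) (fun x => x) false) 0 0

-- ===== PRECONDITION & SPEC =====
def Spec_max_googlers (n : Int) (s : Int) (p : Int) (t : List Int) (out : Int) : Prop := out = max_googlers_alt n s p t
instance (n : Int) (s : Int) (p : Int) (t : List Int) (out : Int) : Decidable (Spec_max_googlers n s p t out) := by unfold Spec_max_googlers; infer_instance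

-- ===== CLAIM (what is proved, stated in full; the proofs are below) =====
def Claim_equal_max_googlers : Prop := ∀ (n : Int) (s : Int) (p : Int) (t : List Int), Dom_max_googlers n s p t → Spec_max_googlers n s p t (max_googlers n s p t)

-- ===== LEMMAS AND PROOFS =====

-- number of cost-0 ("sure") and cost-1 ("surprising") elements
def zCount (p : Int) : List Int → Nat
  | [] => 0
  | x :: r => (if bCost p x = some 0 then 1 else 0) + zCount p r

def oCount (p : Int) : List Int → Nat
  | [] => 0
  | x :: r => (if bCost p x = some 1 then 1 else 0) + oCount p r

-- A's loop computes zCount + min(oCount, max s 0)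
theorem maxLoop_eq (p : Int) (t : List Int) : ∀ (result s i : Int),
    maxLoop p t result s i = result + zCount p t + min (oCount p t : Int) (max s 0) := by
  induction t with
  | nil => intro result s i; simp [maxLoop, zCount, oCount]
  | cons x r ih =>
    intro result s i
    simp only [maxLoop, zCount, oCount]
    by_cases h1 : x ≥ p*3
    · rw [if_pos h1, ih]
      have hc : bCost p x = some 0 := by simp [bCost]; omega
      rw [hc]; simp; omega
    · rw [if_neg h1]
      by_cases h2 : x ≥ p*3 - 2 ∧ p - 1 ≥ 0
      · rw [if_pos h2, ih]
        have hc : bCost p x = some 0 := by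
          simp only [bCost]; rw [if_neg (by omega), if_pos (by omega)]
        rw [hc]; simp; omega
      · rw [if_neg h2]
        have hc0 : bCost p x ≠ some 0 := by
          simp only [bCost]; rw [if_neg (by omega), if_neg (by omega)]
          split <;> simp
        by_cases h3 : s > 0
        · rw [if_pos h3]
          by_cases h4 : x ≥ p*3 - 4 ∧ p - 2 ≥ 0
          · have hc : bCost p x = some 1 := by
              simp only [bCost]; rw [if_neg (by omega), if_neg (by omega), if_pos (by omega)]
            rw [if_pos h4, ih, hc]
            simp; omega
          · have hc : bCost p x = none := by
              simp only [bCost]; rw [if_neg (by omega), if_neg (by omega), if_neg (by omega)]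
            rw [if_neg h4, ih, hc]
            simp
        · rw [if_neg h3, ih]
          rw [if_neg hc0, Nat.zero_add]
          split <;> (push_cast; omega)

-- the cost list is a permutation of zeros-then-ones
theorem filterMap_perm (p : Int) (t : List Int) :
    (List.replicate (zCount p t) (0:Int) ++ List.replicate (oCount p t) 1).Perm
      (t.filterMap (bCost p)) := by
  induction t with
  | nil => simp [zCount, oCount]
  | cons x r ih =>
    simp only [zCount, oCount, List.filterMap_cons]
    rcases hcv : bCost p x with _ | c
    · simpa [hcv] using ih
    · have hcmem : c = 0 ∨ c = 1 := by
        simp only [bCost] at hcv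
        split at hcv
        · exact Or.inl (Option.some.inj hcv).symm
        · split at hcv
          · exact Or.inl (Option.some.inj hcv).symm
          · split at hcv
            · exact Or.inr (Option.some.inj hcv).symm
            · cases hcv
      rcases hcmem with rfl | rfl
      · simpa [Nat.add_comm 1 (zCount p r), List.replicate_succ] using ih.cons (0:Int)
      · have step : ((List.replicate (zCount p r) (0:Int) ++ List.replicate (oCount p r) 1)
            ++ [1]).Perm ((1:Int) :: r.filterMap (bCost p)) := by
          refine List.Perm.trans ?_ (ih.cons 1)
          have h := List.perm_middle (a := (1:Int))
            (l₁ := List.replicate (zCount p r) (0:Int) ++ List.replicate (oCount p r) 1)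
            (l₂ := ([] : List Int))
          rw [List.append_nil] at h
          exact h
        simpa [Nat.add_comm 1 (oCount p r), List.replicate_succ', List.append_assoc] using step

-- sorted cost list IS zeros-then-ones
theorem sorted_costs (p : Int) (t : List Int) :
    PySem.List.sorted (t.filterMap (bCost p)) (fun x => x) false =
      List.replicate (zCount p t) (0:Int) ++ List.replicate (oCount p t) 1 := by
  refine PySem.List.sorted_id_eq_of_perm_of_pairwise _ _ (filterMap_perm p t) ?_
  refine List.pairwise_append.mpr ⟨?_, ?_, ?_⟩
  · exact List.pairwise_replicate.mpr (Or.inr (le_refl _))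
  · exact List.pairwise_replicate.mpr (Or.inr (le_refl _))
  · intro a ha b hb
    rw [List.eq_of_mem_replicate ha, List.eq_of_mem_replicate hb]; omega

-- B's loop over the zeros prefix
theorem bLoop_zeros (cap : Int) (rest : List Int) (z : Nat) :
    ∀ (total spent : Int), spent ≤ cap →
      bLoop cap (List.replicate z (0:Int) ++ rest) total spent = bLoop cap rest (total + z) spent := by
  induction z with
  | zero => intro total spent h; simp
  | succ k ih =>
    intro total spent h
    rw [List.replicate_succ, List.cons_append]
    simp only [bLoop]
    rw [if_neg (by omega), add_zero, ih (total+1) spent h]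
    congr 1
    push_cast; ring

-- B's loop over the ones suffix
theorem bLoop_ones (cap : Int) (o : Nat) :
    ∀ (total spent : Int), spent ≤ cap →
      bLoop cap (List.replicate o (1:Int)) total spent = total + min (o : Int) (cap - spent) := by
  induction o with
  | zero => intro total spent h; simp [bLoop]; omega
  | succ k ih =>
    intro total spent h
    rw [List.replicate_succ]
    simp only [bLoop]
    by_cases hc : spent + 1 > cap
    · rw [if_pos hc]; push_cast; omega
    · rw [if_neg hc, ih (total+1) (spent+1) (by omega)]; push_cast; omega

-- ===== VERDICT (by name: the statement is the Claim_ definition above) =====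
theorem max_googlers_spec : Claim_equal_max_googlers := by
  intro n s p t _
  show max_googlers n s p t = max_googlers_alt n s p t
  rw [max_googlers, maxLoop_eq, max_googlers_alt, sorted_costs,
      bLoop_zeros _ _ _ _ _ (by omega : (0:Int) ≤ max s 0),
      bLoop_ones _ _ _ _ (by omega : (0:Int) ≤ max s 0)]
  omega
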